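-- pv_equiv track=rewrite | github.com/aardoiz/Advent22 | day3/part2.py | filter_trios
-- ===== SOURCE A (Python) =====
-- def filter_trios(original_list: list) -> list:
--
--     final_list = []
--     iter_list = []
--     for i, group in enumerate(original_list):
--
--         iter_list.append(group)
--         if (i+1)%3 == 0:
--                     final_list.append(iter_list)
--                     iter_list = []
--     return final_list
-- ===== SOURCE B (Python) =====
-- def filter_trios(original_list: list) -> list:
--     return [original_list[3 * k : 3 * k + 3] for k in range(len(original_list) // 3)]
-- ===== Notes on version B (the rewrite author's own statement) =====
-- stated objective: simpler
-- what changed: Replaces the enumerate counter with buffer/accumulator state by a single slicing comprehension indexed over range(len//3), which drops the incomplete tail arithmetically.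
import Mathlib
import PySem

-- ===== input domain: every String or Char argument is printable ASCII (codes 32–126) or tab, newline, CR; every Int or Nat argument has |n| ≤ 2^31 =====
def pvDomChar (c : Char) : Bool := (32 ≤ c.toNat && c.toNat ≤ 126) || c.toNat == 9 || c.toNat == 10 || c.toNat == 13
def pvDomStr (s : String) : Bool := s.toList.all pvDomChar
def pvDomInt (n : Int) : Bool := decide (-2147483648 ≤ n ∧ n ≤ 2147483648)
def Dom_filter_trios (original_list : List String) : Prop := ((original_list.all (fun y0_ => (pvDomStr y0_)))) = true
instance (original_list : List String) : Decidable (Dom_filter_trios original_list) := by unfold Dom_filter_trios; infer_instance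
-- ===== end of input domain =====

-- B replaces A's counter-and-buffer loop by a slicing comprehension over range(len//3); same return values (simpler decomposition, no speed claim).
-- ===== PORT A =====
-- the for-loop over enumerate(original_list) with state (final_list, iter_list) and index i
def filterLoopA (final : List (List String)) (iter : List String) (i : Nat) : List String → List (List String)
  | [] => final
  | g :: rest =>
    let iter' := iter ++ [g]
    if (i + 1) % 3 == 0 then filterLoopA (final ++ [iter']) [] (i + 1) rest
    else filterLoopA final iter' (i + 1) rest

def filter_trios (original_list : List String) : List (List String) :=
  filterLoopA [] [] 0 original_list

-- ===== PORT B =====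
-- [original_list[3*k : 3*k+3] for k in range(len(original_list) // 3)]
def filter_trios_alt (original_list : List String) : List (List String) :=
  (PySem.List.pyRange 0 (PySem.Int.floordiv (original_list.length : Int) 3) 1).map
    (fun k => PySem.List.slice original_list (some (3 * k)) (some (3 * k + 3)))

-- ===== PRECONDITION & SPEC =====
def Spec_filter_trios (original_list : List String) (out : List (List String)) : Prop := out = filter_trios_alt original_list
instance (original_list : List String) (out : List (List String)) : Decidable (Spec_filter_trios original_list out) := by unfold Spec_filter_trios; infer_instance

-- ===== CLAIM (what is proved, stated in full; the proofs are below) =====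
def Claim_equal_filter_trios : Prop := ∀ (original_list : List String), Dom_filter_trios original_list → Spec_filter_trios original_list (filter_trios original_list)

-- ===== LEMMAS AND PROOFS =====

-- proof-side reference chunker: both ports are shown equal to it
def chunk3 (l : List String) : List (List String) :=
  if h : l.length < 3 then []
  else l.take 3 :: chunk3 (l.drop 3)
termination_by l.length
decreasing_by simp [List.length_drop]; omega

-- A's loop, started with an empty buffer at an index divisible by 3, appends exactly chunk3's groups.
theorem loopA_eq : ∀ (l : List String) (final : List (List String)) (i : Nat), i % 3 = 0 →
    filterLoopA final [] i l = final ++ chunk3 l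
  | [], final, _, _ => by simp [filterLoopA, chunk3]
  | [a], final, i, _ => by
    have h1 : (i + 1) % 3 ≠ 0 := by omega
    simp [filterLoopA, chunk3, h1]
  | [a, b], final, i, h => by
    have h1 : (i + 1) % 3 ≠ 0 := by omega
    have h2 : (i + 2) % 3 ≠ 0 := by omega
    simp [filterLoopA, chunk3, h1, h2]
  | a :: b :: c :: rest, final, i, h => by
    have h1 : (i + 1) % 3 ≠ 0 := by omega
    have h2 : (i + 1 + 1) % 3 ≠ 0 := by omega
    have h3 : (i + 1 + 1 + 1) % 3 = 0 := by omega
    have ih := loopA_eq rest (final ++ [[a, b, c]]) (i + 1 + 1 + 1) h3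
    have hlen : ¬ (a :: b :: c :: rest).length < 3 := by simp
    rw [chunk3, dif_neg hlen]
    simp only [filterLoopA, beq_iff_eq, h1, h2, h3, if_false, if_true, List.nil_append]
    simpa using ih
termination_by l => l.length

-- B's range-and-slice comprehension, reduced to Nat ranges, also produces chunk3's groups.
theorem rangeMap_eq : ∀ (l : List String),
    (List.range (l.length / 3)).map (fun k => (l.drop (3 * k)).take 3) = chunk3 l
  | [] => by simp [chunk3]
  | [a] => by simp [chunk3]
  | [a, b] => by simp [chunk3]
  | a :: b :: c :: rest => by
    have hlen : ¬ (a :: b :: c :: rest).length < 3 := by simp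
    have hdiv : (a :: b :: c :: rest).length / 3 = rest.length / 3 + 1 := by
      simp; omega
    have ih := rangeMap_eq rest
    rw [chunk3, dif_neg hlen, hdiv, List.range_succ_eq_map, List.map_cons, List.map_map]
    refine congrArg₂ List.cons (by simp) ?_
    rw [show List.drop 3 (a :: b :: c :: rest) = rest from rfl, ← ih]
    apply List.map_congr_left
    intro k _
    simp [Nat.mul_add]
termination_by l => l.length

theorem alt_eq_chunk3 (l : List String) : filter_trios_alt l = chunk3 l := by
  rw [← rangeMap_eq]
  unfold filter_trios_alt
  have hd : PySem.Int.floordiv (l.length : Int) 3 = ((l.length / 3 : Nat) : Int) := by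
    exact_mod_cast PySem.Int.floordiv_natCast l.length 3
  rw [hd, PySem.List.pyRange_zero_natCast, List.map_map]
  apply List.map_congr_left
  intro k _
  simp only [Function.comp]
  exact_mod_cast PySem.List.slice_natCast_add l (3 * k) 3

-- ===== VERDICT (by name: the statement is the Claim_ definition above) =====
theorem filter_trios_spec : Claim_equal_filter_trios := by
  intro l _
  unfold Spec_filter_trios filter_trios
  rw [alt_eq_chunk3]
  simpa using loopA_eq l [] 0 rfl
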